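-- pv_equiv track=rewrite | github.com/jadewisemann/PS-and-Kata | programmers/다리를-지나는-트럭.py | solution
-- ===== SOURCE A (Python) =====
-- def solution(bridge_length, weight, truck_weights):
--     tmp = []
--     result = 0
--     for truck in truck_weights:
--         if not tmp:
--             tmp.append(truck)
--             continue
--         else:
--             if (sum(tmp) + truck) <= weight and len(tmp) <= bridge_length :
--                 tmp.append(truck)
--             else:
--                 result += bridge_length + len(tmp) - 1
--                 tmp = [truck]
--     else: result += bridge_length + len(tmp) - 1
--     return result + 1
-- ===== SOURCE B (Python) =====
-- def solution(bridge_length, weight, truck_weights):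
--     # Stage 1: prefix-sum table, so group feasibility is an O(1) index test.
--     n = len(truck_weights)
--     P = [0]
--     for t in truck_weights:
--         P.append(P[-1] + t)
--     # Stage 2: jump from one group-start index to the next; no running group state.
--     g = 1
--     i = 0
--     while True:
--         k = i + 1
--         while k < n and P[k + 1] - P[i] <= weight and k - i <= bridge_length:
--             k += 1
--         if k >= n:
--             break
--         g += 1
--         i = k
--     return g * (bridge_length - 1) + n + 1
-- ===== Notes on version B (the rewrite author's own statement) =====
-- stated objective: faster
-- what changed: B is two staged passes: it first builds a prefix-sum table, then jumps from one group-start index to the next via O(1) prefix-sum tests and returns the closed form g*(bridge_length-1)+n+1, instead of A's single element-wise loop that carries a tmp list, re-sums it with sum() each step and accumulates result per group.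
import Mathlib
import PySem

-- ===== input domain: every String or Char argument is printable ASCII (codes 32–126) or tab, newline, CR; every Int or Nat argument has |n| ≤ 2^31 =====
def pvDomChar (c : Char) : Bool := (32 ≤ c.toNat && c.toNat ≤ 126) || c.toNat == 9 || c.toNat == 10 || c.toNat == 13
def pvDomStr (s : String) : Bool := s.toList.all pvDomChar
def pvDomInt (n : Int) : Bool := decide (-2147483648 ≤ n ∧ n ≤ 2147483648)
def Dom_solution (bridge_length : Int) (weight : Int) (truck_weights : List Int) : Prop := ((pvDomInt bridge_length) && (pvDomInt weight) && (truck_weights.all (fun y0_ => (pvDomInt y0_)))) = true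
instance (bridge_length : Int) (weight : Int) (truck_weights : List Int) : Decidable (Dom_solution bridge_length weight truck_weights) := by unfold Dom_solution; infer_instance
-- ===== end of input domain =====

-- B: two staged passes (prefix-sum table, then a loop jumping from group start to group start
-- with O(1) prefix-sum tests) and the closed form g*(bridge_length-1)+n+1, replacing A's
-- element-wise loop that re-sums its tmp list each step; objective: faster.

-- ===== PORT A =====
-- loop body of A's for-loop, as a named step function over the state (tmp, result)
def stepA (bridge_length weight : Int) (st : List Int × Int) (truck : Int) : List Int × Int :=
  let tmp := st.1
  let result := st.2
  if tmp = [] then (tmp ++ [truck], result)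
  else if tmp.sum + truck ≤ weight ∧ (tmp.length : Int) ≤ bridge_length then
    (tmp ++ [truck], result)
  else ([truck], result + (bridge_length + (tmp.length : Int) - 1))

def solution (bridge_length : Int) (weight : Int) (truck_weights : List Int) : Int :=
  let st := truck_weights.foldl (stepA bridge_length weight) ([], 0)
  (st.2 + (bridge_length + (st.1.length : Int) - 1)) + 1

-- ===== PORT B =====
-- Source B stage 1: the prefix-sum table P (P[-1] read as getLast?.getD 0)
def buildP (truck_weights : List Int) : List Int :=
  truck_weights.foldl (fun acc t => acc ++ [acc.getLast?.getD 0 + t]) [0]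

-- Source B inner while: advance k while truck k still fits the group that starts at i
-- (the extra Nat argument is fuel, a pure totality guard: callers pass n + 1, always enough)
def advB (P : List Int) (n : Nat) (bl w : Int) (i : Nat) : Nat → Nat → Nat
  | 0, k => k
  | fuel + 1, k =>
    if k < n ∧ P.getD (k + 1) 0 - P.getD i 0 ≤ w ∧ ((k : Int) - (i : Int)) ≤ bl then
      advB P n bl w i fuel (k + 1)
    else k

-- Source B outer while True: jump to the next group start, counting groups (fuel likewise)
def loopB (P : List Int) (n : Nat) (bl w : Int) : Nat → Int → Nat → Int
  | 0, g, _ => g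
  | fuel + 1, g, i =>
    let k := advB P n bl w i (n + 1) (i + 1)
    if n ≤ k then g else loopB P n bl w fuel (g + 1) k

def solution_alt (bridge_length : Int) (weight : Int) (truck_weights : List Int) : Int :=
  let n := truck_weights.length
  let P := buildP truck_weights
  let g := loopB P n bridge_length weight (n + 1) 1 0
  g * (bridge_length - 1) + (n : Int) + 1

-- ===== PRECONDITION & SPEC =====
def Spec_solution (bridge_length : Int) (weight : Int) (truck_weights : List Int) (out : Int) : Prop := out = solution_alt bridge_length weight truck_weights
instance (bridge_length : Int) (weight : Int) (truck_weights : List Int) (out : Int) : Decidable (Spec_solution bridge_length weight truck_weights out) := by unfold Spec_solution; infer_instance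

-- ===== CLAIM (what is proved, stated in full; the proofs are below) =====
def Claim_equal_solution : Prop := ∀ (bridge_length : Int) (weight : Int) (truck_weights : List Int), Dom_solution bridge_length weight truck_weights → Spec_solution bridge_length weight truck_weights (solution bridge_length weight truck_weights)

-- ===== LEMMAS AND PROOFS =====

-- proof-only intermediate: an element-wise greedy step over scalar state (g, s, L)
def stepB (bl w : Int) (st : Int × Int × Int) (t : Int) : Int × Int × Int :=
  let g := st.1
  let s := st.2.1
  let L := st.2.2
  if L = 0 ∨ (s + t ≤ w ∧ L ≤ bl) then (g, s + t, L + 1)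
  else (g + 1, t, 1)

-- A's fold equals the scalar-state group count in closed form
lemma fold_rel (bl w : Int) : ∀ (tws tmp : List Int) (result g : Int),
    (let st := tws.foldl (stepA bl w) (tmp, result)
     (st.2 + (bl + (st.1.length : Int) - 1)) + 1)
    = (tws.foldl (stepB bl w) (g, tmp.sum, (tmp.length : Int))).1 * (bl - 1)
      + (tws.length : Int) + (result - (g - 1) * (bl - 1) + (tmp.length : Int)) + 1 := by
  intro tws
  induction tws with
  | nil => intro tmp result g; simp; ring
  | cons t rest ih =>
    intro tmp result g
    simp only [List.foldl_cons, stepA, stepB]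
    by_cases h0 : tmp = []
    · subst h0
      have hL : ((([] : List Int).length : Int) = 0) := by simp
      rw [if_pos rfl, if_pos (Or.inl hL)]
      have := ih [t] result g
      simp only [List.sum_cons, List.sum_nil, List.length_cons, List.length_nil,
        List.nil_append] at this ⊢
      push_cast at this ⊢
      norm_num at this ⊢
      linarith [this]
    · rw [if_neg h0]
      have hL : ¬ ((tmp.length : Int) = 0) := by
        simp [List.length_eq_zero_iff, h0]
      by_cases hc : tmp.sum + t ≤ w ∧ (tmp.length : Int) ≤ bl
      · rw [if_pos hc, if_pos (Or.inr hc)]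
        have := ih (tmp ++ [t]) result g
        simp only [List.sum_append, List.sum_cons, List.sum_nil, List.length_append,
          List.length_cons, List.length_nil] at this ⊢
        push_cast at this ⊢
        norm_num at this ⊢
        linarith [this]
      · rw [if_neg hc]
        rw [if_neg (by tauto : ¬ ((tmp.length : Int) = 0 ∨ (tmp.sum + t ≤ w ∧ (tmp.length : Int) ≤ bl)))]
        have := ih [t] (result + (bl + (tmp.length : Int) - 1)) (g + 1)
        simp only [List.sum_cons, List.sum_nil, List.length_cons, List.length_nil] at this ⊢
        push_cast at this ⊢
        norm_num at this ⊢
        linarith [this]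

-- buildP is the table of prefix sums
lemma buildP_eq (tws : List Int) :
    buildP tws = (List.range (tws.length + 1)).map (fun k => (tws.take k).sum) := by
  induction tws using List.reverseRecOn with
  | nil => simp [buildP]
  | append_singleton l t ih =>
    unfold buildP at ih ⊢
    rw [List.foldl_append, ih]
    have hlast : ((List.range (l.length + 1)).map (fun k => (l.take k).sum)).getLast?.getD 0
        = l.sum := by
      rw [List.getLast?_eq_getElem?]
      simp
    rw [List.foldl_cons, List.foldl_nil, hlast]
    rw [List.length_append, List.length_cons, List.length_nil]
    have : List.range (l.length + 1 + 1) = List.range (l.length + 1) ++ [l.length + 1] := by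
      rw [List.range_succ]
    rw [this, List.map_append]
    congr 1
    · apply List.map_congr_left
      intro k hk
      rw [List.mem_range] at hk
      rw [List.take_append_of_le_length (by omega)]
    · simp only [List.map_cons, List.map_nil]
      rw [List.take_of_length_le (by simp), List.sum_append]
      simp

lemma buildP_getD (tws : List Int) (k : Nat) (hk : k ≤ tws.length) :
    (buildP tws).getD k 0 = (tws.take k).sum := by
  rw [buildP_eq, List.getD]
  simp [Nat.lt_succ_of_le hk]

lemma sum_take_succ (tws : List Int) (k : Nat) (hk : k < tws.length) :
    (tws.take (k + 1)).sum = (tws.take k).sum + tws[k] := by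
  exact List.sum_take_succ tws k hk

-- the inner while never moves k backwards …
lemma advB_ge (P : List Int) (n : Nat) (bl w : Int) (i : Nat) :
    ∀ (f k : Nat), k ≤ advB P n bl w i f k := by
  intro f
  induction f with
  | zero => intro k; simp [advB]
  | succ f ih =>
    intro k
    rw [advB]
    split_ifs with h
    · exact le_trans (by omega) (ih (k + 1))
    · exact le_rfl
-- … and its result does not depend on the fuel once the fuel is adequate
lemma advB_fuel (P : List Int) (n : Nat) (bl w : Int) (i : Nat) :
    ∀ (f1 f2 k : Nat), n - k < f1 → n - k < f2 →
      advB P n bl w i f1 k = advB P n bl w i f2 k := by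
  intro f1
  induction f1 with
  | zero => intro f2 k h1 h2; omega
  | succ f1 ih =>
    intro f2 k h1 h2
    cases f2 with
    | zero => omega
    | succ f2 =>
      rw [advB, advB]
      split_ifs with h
      · exact ih f2 (k + 1) (by omega) (by omega)
      · rfl

-- the outer loop's result does not depend on the fuel once the fuel is adequate
lemma loopB_fuel (P : List Int) (n : Nat) (bl w : Int) :
    ∀ (f1 f2 : Nat) (g : Int) (i : Nat), n - i < f1 → n - i < f2 →
      loopB P n bl w f1 g i = loopB P n bl w f2 g i := by
  intro f1
  induction f1 with
  | zero => intro f2 g i h1 h2; omega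
  | succ f1 ih =>
    intro f2 g i h1 h2
    cases f2 with
    | zero => omega
    | succ f2 =>
      rw [loopB, loopB]
      split_ifs with h
      · rfl
      · have hge := advB_ge P n bl w i (n + 1) (i + 1)
        exact ih f2 (g + 1) (advB P n bl w i (n + 1) (i + 1)) (by omega) (by omega)

-- the core correspondence: folding stepB over the rest of the list from a mid-group state
-- equals the index-jumping loop of B
lemma S (bl w : Int) (tws : List Int) : ∀ (m k i : Nat) (g : Int),
    tws.length - k ≤ m → i < k → k ≤ tws.length →
    ((tws.drop k).foldl (stepB bl w)
        (g, (tws.take k).sum - (tws.take i).sum, ((k : Int) - (i : Int)))).1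
    = (if tws.length ≤ advB (buildP tws) tws.length bl w i (tws.length + 1) k then g
       else loopB (buildP tws) tws.length bl w (tws.length + 1) (g + 1)
              (advB (buildP tws) tws.length bl w i (tws.length + 1) k)) := by
  intro m
  induction m with
  | zero =>
    intro k i g hm hik hkn
    have hk : k = tws.length := by omega
    subst hk
    rw [List.drop_length, List.foldl_nil]
    have hadv : advB (buildP tws) tws.length bl w i (tws.length + 1) tws.length
        = tws.length := by
      rw [advB]
      exact if_neg (fun h => absurd h.1 (lt_irrefl _))
    rw [hadv, if_pos le_rfl]
  | succ m ih =>
    intro k i g hm hik hkn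
    by_cases hkn' : k < tws.length
    · rw [List.drop_eq_getElem_cons hkn', List.foldl_cons]
      have hcondP : (buildP tws).getD (k + 1) 0 - (buildP tws).getD i 0
          = (tws.take (k + 1)).sum - (tws.take i).sum := by
        rw [buildP_getD tws (k + 1) (by omega), buildP_getD tws i (by omega)]
      have hsum := sum_take_succ tws k hkn'
      by_cases hc : (tws.take k).sum - (tws.take i).sum + tws[k] ≤ w
          ∧ ((k : Int) - (i : Int)) ≤ bl
      · -- truck k joins the current group
        rw [stepB]
        simp only []
        rw [if_pos (Or.inr hc)]
        have heq : ((g, (tws.take k).sum - (tws.take i).sum + tws[k],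
            ((k : Int) - (i : Int)) + 1) : Int × Int × Int)
            = (g, (tws.take (k + 1)).sum - (tws.take i).sum, (((k + 1 : Nat) : Int) - (i : Int))) := by
          rw [hsum]
          simp only [Prod.mk.injEq]
          refine ⟨trivial, by ring, by push_cast; ring⟩
        rw [heq]
        have := ih (k + 1) i g (by omega) (by omega) (by omega)
        rw [this]
        have hadv : advB (buildP tws) tws.length bl w i (tws.length + 1) k
            = advB (buildP tws) tws.length bl w i (tws.length + 1) (k + 1) := by
          rw [advB]
          rw [if_pos ⟨hkn', by rw [hcondP]; omega, hc.2⟩]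
          exact advB_fuel _ _ _ _ _ _ _ _ (by omega) (by omega)
        rw [hadv]
      · -- truck k starts a new group
        rw [stepB]
        simp only []
        have hneg : ¬ (((k : Int) - (i : Int) = 0)
            ∨ ((tws.take k).sum - (tws.take i).sum + tws[k] ≤ w ∧ (k : Int) - (i : Int) ≤ bl)) := by
          rintro (h | h)
          · omega
          · exact hc h
        rw [if_neg hneg]
        have hadv : advB (buildP tws) tws.length bl w i (tws.length + 1) k = k := by
          rw [advB]
          rw [if_neg (by rw [hcondP]; intro h; exact hc ⟨by omega, h.2.2⟩)]
        rw [hadv, if_neg (by omega)]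
        have heq : ((g + 1, tws[k], (1 : Int)) : Int × Int × Int)
            = (g + 1, (tws.take (k + 1)).sum - (tws.take k).sum,
               (((k + 1 : Nat) : Int) - (k : Int))) := by
          rw [hsum]
          simp only [Prod.mk.injEq]
          refine ⟨trivial, by ring, by push_cast; ring⟩
        rw [heq]
        have := ih (k + 1) k (g + 1) (by omega) (by omega) (by omega)
        rw [this]
        conv_rhs => rw [loopB]
        set k' := advB (buildP tws) tws.length bl w k (tws.length + 1) (k + 1) with hk'
        by_cases hnk : tws.length ≤ k'
        · rw [if_pos hnk, if_pos hnk]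
        · rw [if_neg hnk, if_neg hnk]
          have hge := advB_ge (buildP tws) tws.length bl w k (tws.length + 1) (k + 1)
          rw [← hk'] at hge
          exact loopB_fuel _ _ _ _ _ _ _ _ (by omega) (by omega)
    · have hk : k = tws.length := by omega
      subst hk
      rw [List.drop_length, List.foldl_nil]
      have hadv : advB (buildP tws) tws.length bl w i (tws.length + 1) tws.length
          = tws.length := by
        rw [advB]
        exact if_neg (fun h => absurd h.1 (lt_irrefl _))
      rw [hadv, if_pos le_rfl]

lemma fold_stepB_eq_loopB (bl w : Int) (tws : List Int) :
    (tws.foldl (stepB bl w) (1, 0, 0)).1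
    = loopB (buildP tws) tws.length bl w (tws.length + 1) 1 0 := by
  cases tws with
  | nil =>
    rw [List.foldl_nil, loopB]
    simp [advB]
  | cons t rest =>
    have h0 : 0 < (t :: rest).length := by simp
    have hd : (t :: rest) = (t :: rest)[0] :: (t :: rest).drop 1 := by simp
    conv_lhs => rw [hd]
    rw [List.foldl_cons]
    have hstep : stepB bl w (1, 0, 0) ((t :: rest)[0])
        = (1, ((t :: rest).take 1).sum - ((t :: rest).take 0).sum,
           (((1 : Nat) : Int) - ((0 : Nat) : Int))) := by
      simp [stepB]
    rw [hstep]
    have := S bl w (t :: rest) (t :: rest).length 1 0 1 (by omega) (by omega) (by simp)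
    rw [this]
    conv_rhs => rw [loopB]
    by_cases hnk : (t :: rest).length
        ≤ advB (buildP (t :: rest)) (t :: rest).length bl w 0 ((t :: rest).length + 1) 1
    · rw [if_pos hnk, if_pos hnk]
    · rw [if_neg hnk, if_neg hnk]
      have hge := advB_ge (buildP (t :: rest)) (t :: rest).length bl w 0 ((t :: rest).length + 1) 1
      exact loopB_fuel _ _ _ _ _ _ _ _ (by omega) (by omega)

-- ===== VERDICT (by name: the statement is the Claim_ definition above) =====
theorem solution_spec : Claim_equal_solution := by
  intro bl w tws _
  unfold Spec_solution solution solution_alt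
  have h1 := fold_rel bl w tws [] 0 1
  simp only [List.sum_nil, List.length_nil, Nat.cast_zero] at h1
  rw [h1, fold_stepB_eq_loopB]
  ring
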